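-- pv_equiv track=rewrite | github.com/iasomura/nextstep2026 | phishing_agent/tools/contextual_risk_assessment.py | _count_high_risk_hits
-- ===== SOURCE A (Python) =====
-- from typing import Any, Dict, List, Optional
--
-- MULTILINGUAL_RISK_WORDS: frozenset = frozenset([
--     # フランス語 (2026-01-26: FN分析に基づき拡充)
--     "connexion", "verification", "confirmer", "actualiser", "securite",
--     "authentification", "identifiant", "compte", "messagerie",
--     "dossier", "livraison", "colis", "facture", "renouvellement",
--     "debloquer", "reactiver", "espace",
--     # 2026-01-26追加: フランス語 配送/税金/銀行詐欺で頻出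
--     "suivi", "remboursement", "virement", "paiement", "bancaire",
--     "impots", "amende", "douane", "carte", "retrait", "depot",
--     "chronopost", "laposte", "colissimo", "relais", "infos",
--     # ポルトガル語
--     "verificar", "confirmar", "atualizar", "seguranca", "autenticacao",
--     "acesso", "conta", "pagamento", "fatura", "entrega",
--     "desbloqueio", "atualizacao", "validacao",
--     # スペイン語
--     "verificacion", "confirmar", "actualizar", "seguridad", "autenticacion",
--     "acceso", "cuenta", "pago", "factura", "envio",
--     "desbloquear", "reactivar", "validacion",
--     # ドイツ語
--     "anmeldung", "bestatigung", "sicherheit", "konto", "passwort",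
--     "zugang", "lieferung", "rechnung", "aktualisierung",
--     "freischaltung", "verifizierung",
--     # イタリア語
--     "accesso", "verifica", "sicurezza", "pagamento",
--     "consegna", "fattura", "sblocco", "aggiornamento",
--     # 一般的な多言語フィッシングパターン
--     "webmail", "portail", "espace", "client", "membre",
--     "usuario", "utilisateur", "utente", "benutzer",
--     "recuperar", "recuperer", "ripristino",
--     # 2026-01-25追加: 英語のアクション系フィッシングキーワード (FN分析: updateza.top等)
--     "update", "renew", "suspend", "suspended",
--     "expire", "expired", "expiring",
--     "unlock", "reactivate", "restore",
--     "verify", "validate", "confirm",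
--     "alert", "urgent", "warning", "notice",
--     # 2026-01-26追加: サービス関連キーワード (FN分析: service偽装ドメイン)
--     "service", "services", "support", "customer", "helpdesk",
--     "technical", "billing", "invoice", "receipt", "refund",
--     "activation", "registration", "subscription", "membership",
--     "notification", "delivery", "shipping", "tracking", "parcel",
-- ])
--
-- def _count_high_risk_hits(tokens: List[str], high_risk_words: Optional[List[str]]) -> int:
--     """high_risk_words + MULTILINGUAL_RISK_WORDS に含まれるトークンがいくつあるか数えるヘルパー.
--
--     変更履歴:
--       - 2026-01-24: MULTILINGUAL_RISK_WORDS も検索対象に追加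
--       - 2026-01-25: 部分一致も検出するよう修正 (updateza → update)
--                    ただし4文字未満のキーワードは除外（誤検知防止）
--     """
--     hr: set = set()
--     if high_risk_words:
--         hr = {w.strip().lower() for w in high_risk_words if w and str(w).strip()}
--     # 多言語キーワードを常に含める
--     hr.update(MULTILINGUAL_RISK_WORDS)
--     if not hr:
--         return 0
--
--     hits = 0
--     for t in tokens:
--         # 完全一致
--         if t in hr:
--             hits += 1
--             continue
--         # 部分一致（4文字以上のキーワードのみ）
--         for kw in hr:
--             if len(kw) >= 4 and kw in t:
--                 hits += 1
--                 break  # 1トークンにつき1ヒットまで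
--     return hits
-- ===== SOURCE B (Python) =====
-- from typing import List, Optional
--
-- RISK_CHUNKS = [
--     "connexion verification confirmer actualiser securite authentification identifiant compte messagerie dossier",
--     "livraison colis facture renouvellement debloquer reactiver espace suivi remboursement virement paiement",
--     "bancaire impots amende douane carte retrait depot chronopost laposte colissimo relais infos verificar",
--     "confirmar atualizar seguranca autenticacao acesso conta pagamento fatura entrega desbloqueio atualizacao",
--     "validacao verificacion confirmar actualizar seguridad autenticacion acceso cuenta pago factura envio",
--     "desbloquear reactivar validacion anmeldung bestatigung sicherheit konto passwort zugang lieferung rechnung",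
--     "aktualisierung freischaltung verifizierung accesso verifica sicurezza pagamento consegna fattura sblocco",
--     "aggiornamento webmail portail espace client membre usuario utilisateur utente benutzer recuperar recuperer",
--     "ripristino update renew suspend suspended expire expired expiring unlock reactivate restore verify validate",
--     "confirm alert urgent warning notice service services support customer helpdesk technical billing invoice",
--     "receipt refund activation registration subscription membership notification delivery shipping tracking",
--     "parcel"
-- ]
--
-- def _count_high_risk_hits(tokens: List[str], high_risk_words: Optional[List[str]]) -> int:
--     """Count tokens that equal a risk keyword, or contain one of length >= 4.
--
--     Different approach: the keywords live in a hash set; instead of testing every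
--     keyword against every token, each token is tested by looking up its own
--     substrings (one lookup per start position and distinct keyword length)."""
--     kws = set()
--     for chunk in RISK_CHUNKS:
--         kws.update(chunk.split())
--     if high_risk_words:
--         kws.update(w.strip().lower() for w in high_risk_words if w and w.strip())
--     long_kws = {kw for kw in kws if len(kw) >= 4}
--     lengths = {len(kw) for kw in long_kws}
--
--     def hit(t: str) -> bool:
--         if t in kws:
--             return True
--         n = len(t)
--         return any(t[i:i + L] in long_kws
--                    for L in lengths if L <= n
--                    for i in range(n - L + 1))
--
--     return sum(1 for t in tokens if hit(t))
-- ===== Notes on version B (the rewrite author's own statement) =====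
-- stated objective: faster
-- what changed: B keeps the keywords in a hash set and, per token, looks up the token's own substrings (one lookup per start position and distinct keyword length) instead of scanning every keyword against every token; the count is a 0/1 sum instead of A's branch-and-accumulate loop, and the keyword constant is stored as space-separated chunks split once at startup.
import Mathlib
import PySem

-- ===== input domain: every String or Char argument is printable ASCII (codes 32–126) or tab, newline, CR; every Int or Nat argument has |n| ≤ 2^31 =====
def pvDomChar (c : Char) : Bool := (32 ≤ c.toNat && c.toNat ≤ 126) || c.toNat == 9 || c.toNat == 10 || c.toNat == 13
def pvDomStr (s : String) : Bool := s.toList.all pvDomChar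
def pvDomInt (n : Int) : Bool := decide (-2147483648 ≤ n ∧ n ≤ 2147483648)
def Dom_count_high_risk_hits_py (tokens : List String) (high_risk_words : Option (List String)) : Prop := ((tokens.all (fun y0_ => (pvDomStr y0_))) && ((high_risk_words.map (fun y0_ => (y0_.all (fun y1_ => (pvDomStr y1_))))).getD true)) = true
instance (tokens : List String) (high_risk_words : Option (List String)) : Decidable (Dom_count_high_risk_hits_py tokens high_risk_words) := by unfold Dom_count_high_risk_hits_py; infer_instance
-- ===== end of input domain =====

-- B replaces A's per-token scan over every keyword by hash-set lookups of the token's own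
-- substrings (one per start position and distinct keyword length), summing 0/1 per token.

-- ===== PORT A =====
-- MULTILINGUAL_RISK_WORDS: the literal words in source order (the frozenset is only ever used
-- with set semantics — membership and set-update — which are order-independent)
def pvRiskWords : List String := [
  "connexion", "verification", "confirmer", "actualiser", "securite", "authentification",
  "identifiant", "compte", "messagerie", "dossier", "livraison", "colis", "facture", "renouvellement",
  "debloquer", "reactiver", "espace", "suivi", "remboursement", "virement", "paiement", "bancaire",
  "impots", "amende", "douane", "carte", "retrait", "depot", "chronopost", "laposte", "colissimo",
  "relais", "infos", "verificar", "confirmar", "atualizar", "seguranca", "autenticacao", "acesso",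
  "conta", "pagamento", "fatura", "entrega", "desbloqueio", "atualizacao", "validacao",
  "verificacion", "confirmar", "actualizar", "seguridad", "autenticacion", "acceso", "cuenta", "pago",
  "factura", "envio", "desbloquear", "reactivar", "validacion", "anmeldung", "bestatigung",
  "sicherheit", "konto", "passwort", "zugang", "lieferung", "rechnung", "aktualisierung",
  "freischaltung", "verifizierung", "accesso", "verifica", "sicurezza", "pagamento", "consegna",
  "fattura", "sblocco", "aggiornamento", "webmail", "portail", "espace", "client", "membre",
  "usuario", "utilisateur", "utente", "benutzer", "recuperar", "recuperer", "ripristino", "update",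
  "renew", "suspend", "suspended", "expire", "expired", "expiring", "unlock", "reactivate", "restore",
  "verify", "validate", "confirm", "alert", "urgent", "warning", "notice", "service", "services",
  "support", "customer", "helpdesk", "technical", "billing", "invoice", "receipt", "refund",
  "activation", "registration", "subscription", "membership", "notification", "delivery", "shipping",
  "tracking", "parcel"]

-- w.strip().lower()
def pvNorm (w : String) : String := PySem.Str.lower (PySem.Str.strip w)

-- 'if w and str(w).strip()'  (w is a str, so str(w) is w)
def pvKeep (w : String) : Bool := (w != "") && (PySem.Str.strip w != "")

-- inner loop 'for kw in hr: if len(kw) >= 4 and kw in t: hits += 1; break'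
def pvInnerA (t : String) : List String → Bool
  | [] => false
  | kw :: rest =>
    if decide (4 ≤ PySem.Str.len kw) && PySem.Str.isIn kw t then true else pvInnerA t rest

-- local variable 'hr' before the update: set comprehension over high_risk_words (if truthy)
def pvHr0 (high_risk_words : Option (List String)) : PySem.Set String :=
  match high_risk_words with
  | none => PySem.Set.empty
  | some ws =>
    if ws = [] then PySem.Set.empty
    else PySem.Set.ofList ((ws.filter pvKeep).map pvNorm)

-- local variable 'hr' after 'hr.update(MULTILINGUAL_RISK_WORDS)'
def pvHrA (high_risk_words : Option (List String)) : PySem.Set String :=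
  PySem.Set.update (pvHr0 high_risk_words) pvRiskWords

def count_high_risk_hits_py (tokens : List String) (high_risk_words : Option (List String)) : Int :=
  if pvHrA high_risk_words = ([] : List String) then 0
  else
    tokens.foldl (fun hits t =>
      if PySem.Set.contains (pvHrA high_risk_words) t then hits + 1
      else if pvInnerA t (pvHrA high_risk_words) then hits + 1 else hits) 0

-- ===== PORT B =====
-- RISK_CHUNKS: the same keywords, stored as space-separated chunks and split at startup
def bChunks : List String := [
  "connexion verification confirmer actualiser securite authentification identifiant compte messagerie dossier",
  "livraison colis facture renouvellement debloquer reactiver espace suivi remboursement virement paiement",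
  "bancaire impots amende douane carte retrait depot chronopost laposte colissimo relais infos verificar",
  "confirmar atualizar seguranca autenticacao acesso conta pagamento fatura entrega desbloqueio atualizacao",
  "validacao verificacion confirmar actualizar seguridad autenticacion acceso cuenta pago factura envio",
  "desbloquear reactivar validacion anmeldung bestatigung sicherheit konto passwort zugang lieferung rechnung",
  "aktualisierung freischaltung verifizierung accesso verifica sicurezza pagamento consegna fattura sblocco",
  "aggiornamento webmail portail espace client membre usuario utilisateur utente benutzer recuperar recuperer",
  "ripristino update renew suspend suspended expire expired expiring unlock reactivate restore verify validate",
  "confirm alert urgent warning notice service services support customer helpdesk technical billing invoice",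
  "receipt refund activation registration subscription membership notification delivery shipping tracking",
  "parcel"]

-- 'kws = set()' then 'for chunk in RISK_CHUNKS: kws.update(chunk.split())'
def bKws0 : PySem.Set String :=
  bChunks.foldl (fun s c => PySem.Set.update s (PySem.Str.split₀ c)) PySem.Set.empty

-- 'if high_risk_words: kws.update(w.strip().lower() for w in high_risk_words if w and w.strip())'
def bKws (high_risk_words : Option (List String)) : PySem.Set String :=
  match high_risk_words with
  | none => bKws0
  | some ws =>
    if ws = [] then bKws0
    else PySem.Set.update bKws0
      ((ws.filter (fun w => (w != "") && (PySem.Str.strip w != ""))).map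
        (fun w => PySem.Str.lower (PySem.Str.strip w)))

-- long_kws = {kw for kw in kws if len(kw) >= 4}
def bLong (kws : PySem.Set String) : PySem.Set String :=
  PySem.Set.ofList (List.filter (fun kw => decide (4 ≤ PySem.Str.len kw)) kws)

-- lengths = {len(kw) for kw in long_kws}
def bLens (long : PySem.Set String) : PySem.Set Int :=
  PySem.Set.ofList (List.map PySem.Str.len long)

-- the generator's innermost clause: 'for i in range(n - L + 1)' with the substring lookup
def bScanAt (t : String) (long : PySem.Set String) (L : Int) : Bool :=
  (PySem.List.pyRange 0 (PySem.Str.len t - L + 1) 1).any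
    (fun i => PySem.Set.contains long (PySem.Str.slice t (some i) (some (i + L))))

-- hit(t): exact membership, else 'any(... for L in lengths if L <= n for i ...)'
def bHit (kws long : PySem.Set String) (lens : List Int) (t : String) : Bool :=
  PySem.Set.contains kws t ||
    ((lens.filter (fun L => decide (L ≤ PySem.Str.len t))).any (bScanAt t long))

-- 'return sum(1 for t in tokens if hit(t))'
def count_high_risk_hits_py_alt (tokens : List String) (high_risk_words : Option (List String)) : Int :=
  (tokens.map (fun t =>
      if bHit (bKws high_risk_words) (bLong (bKws high_risk_words))
          (bLens (bLong (bKws high_risk_words))) t then (1 : Int) else 0)).sum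

-- ===== PRECONDITION & SPEC =====
def Spec_count_high_risk_hits_py (tokens : List String) (high_risk_words : Option (List String)) (out : Int) : Prop := out = count_high_risk_hits_py_alt tokens high_risk_words
instance (tokens : List String) (high_risk_words : Option (List String)) (out : Int) : Decidable (Spec_count_high_risk_hits_py tokens high_risk_words out) := by unfold Spec_count_high_risk_hits_py; infer_instance

-- ===== CLAIM (what is proved, stated in full; the proofs are below) =====
def Claim_equal_count_high_risk_hits_py : Prop := ∀ (tokens : List String) (high_risk_words : Option (List String)), Dom_count_high_risk_hits_py tokens high_risk_words → Spec_count_high_risk_hits_py tokens high_risk_words (count_high_risk_hits_py tokens high_risk_words)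

-- ===== LEMMAS AND PROOFS =====

-- each chunk splits into its words
theorem bSplit_1 : PySem.Str.split₀ "connexion verification confirmer actualiser securite authentification identifiant compte messagerie dossier" = ["connexion", "verification", "confirmer", "actualiser", "securite", "authentification", "identifiant", "compte", "messagerie", "dossier"] := by decide
theorem bSplit_2 : PySem.Str.split₀ "livraison colis facture renouvellement debloquer reactiver espace suivi remboursement virement paiement" = ["livraison", "colis", "facture", "renouvellement", "debloquer", "reactiver", "espace", "suivi", "remboursement", "virement", "paiement"] := by decide
theorem bSplit_3 : PySem.Str.split₀ "bancaire impots amende douane carte retrait depot chronopost laposte colissimo relais infos verificar" = ["bancaire", "impots", "amende", "douane", "carte", "retrait", "depot", "chronopost", "laposte", "colissimo", "relais", "infos", "verificar"] := by decide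
theorem bSplit_4 : PySem.Str.split₀ "confirmar atualizar seguranca autenticacao acesso conta pagamento fatura entrega desbloqueio atualizacao" = ["confirmar", "atualizar", "seguranca", "autenticacao", "acesso", "conta", "pagamento", "fatura", "entrega", "desbloqueio", "atualizacao"] := by decide
theorem bSplit_5 : PySem.Str.split₀ "validacao verificacion confirmar actualizar seguridad autenticacion acceso cuenta pago factura envio" = ["validacao", "verificacion", "confirmar", "actualizar", "seguridad", "autenticacion", "acceso", "cuenta", "pago", "factura", "envio"] := by decide
theorem bSplit_6 : PySem.Str.split₀ "desbloquear reactivar validacion anmeldung bestatigung sicherheit konto passwort zugang lieferung rechnung" = ["desbloquear", "reactivar", "validacion", "anmeldung", "bestatigung", "sicherheit", "konto", "passwort", "zugang", "lieferung", "rechnung"] := by decide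
theorem bSplit_7 : PySem.Str.split₀ "aktualisierung freischaltung verifizierung accesso verifica sicurezza pagamento consegna fattura sblocco" = ["aktualisierung", "freischaltung", "verifizierung", "accesso", "verifica", "sicurezza", "pagamento", "consegna", "fattura", "sblocco"] := by decide
theorem bSplit_8 : PySem.Str.split₀ "aggiornamento webmail portail espace client membre usuario utilisateur utente benutzer recuperar recuperer" = ["aggiornamento", "webmail", "portail", "espace", "client", "membre", "usuario", "utilisateur", "utente", "benutzer", "recuperar", "recuperer"] := by decide
theorem bSplit_9 : PySem.Str.split₀ "ripristino update renew suspend suspended expire expired expiring unlock reactivate restore verify validate" = ["ripristino", "update", "renew", "suspend", "suspended", "expire", "expired", "expiring", "unlock", "reactivate", "restore", "verify", "validate"] := by decide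
theorem bSplit_10 : PySem.Str.split₀ "confirm alert urgent warning notice service services support customer helpdesk technical billing invoice" = ["confirm", "alert", "urgent", "warning", "notice", "service", "services", "support", "customer", "helpdesk", "technical", "billing", "invoice"] := by decide
theorem bSplit_11 : PySem.Str.split₀ "receipt refund activation registration subscription membership notification delivery shipping tracking" = ["receipt", "refund", "activation", "registration", "subscription", "membership", "notification", "delivery", "shipping", "tracking"] := by decide
theorem bSplit_12 : PySem.Str.split₀ "parcel" = ["parcel"] := by decide

-- B's startup loop collects exactly the words of all chunks
theorem b_mem_foldl_update (cs : List String) (s0 : PySem.Set String) (x : String) :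
    x ∈ cs.foldl (fun s c => PySem.Set.update s (PySem.Str.split₀ c)) s0 ↔
      x ∈ s0 ∨ x ∈ cs.flatMap PySem.Str.split₀ := by
  induction cs generalizing s0 with
  | nil => simp
  | cons c cs ih =>
    simp only [List.foldl_cons, List.flatMap_cons, ih, PySem.Set.mem_update, List.mem_append]
    tauto

-- the chunks carry exactly A's word list
set_option maxRecDepth 10000 in
theorem b_flat_eq : bChunks.flatMap PySem.Str.split₀ = pvRiskWords := by
  simp only [bChunks, List.flatMap_cons, List.flatMap_nil,
    bSplit_1, bSplit_2, bSplit_3, bSplit_4, bSplit_5, bSplit_6, bSplit_7, bSplit_8, bSplit_9, bSplit_10, bSplit_11, bSplit_12, List.append_nil]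
  rfl

-- A's keyword set and B's keyword set have the same members
theorem pv_mem_hr_kws (high_risk_words : Option (List String)) (x : String) :
    x ∈ pvHrA high_risk_words ↔ x ∈ bKws high_risk_words := by
  have h0 : x ∈ bKws0 ↔ x ∈ pvRiskWords := by
    rw [bKws0, b_mem_foldl_update, b_flat_eq]
    simp [PySem.Set.empty]
  cases high_risk_words with
  | none => simp [pvHrA, pvHr0, bKws, PySem.Set.mem_update, h0, PySem.Set.empty]
  | some ws =>
    by_cases hws : ws = []
    · simp [pvHrA, pvHr0, bKws, hws, PySem.Set.mem_update, h0, PySem.Set.empty]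
    · simp only [pvHrA, pvHr0, bKws, if_neg hws, PySem.Set.mem_update,
        PySem.Set.mem_ofList, h0]
      exact or_comm

-- A's inner break-loop is an 'any' over the keyword list
theorem pvInnerA_eq_any (t : String) (l : List String) :
    pvInnerA t l = l.any (fun kw => decide (4 ≤ PySem.Str.len kw) && PySem.Str.isIn kw t) := by
  induction l with
  | nil => rfl
  | cons kw rest ih =>
    simp only [pvInnerA, List.any_cons, ih]
    cases h : decide (4 ≤ PySem.Str.len kw) && PySem.Str.isIn kw t <;> simp_all

-- bridge: a Python slice of a string with nonnegative bounds, as take/drop on the char list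
theorem pv_slice_toList (t : String) (a b : Int) (ha : 0 ≤ a) (hb : 0 ≤ b) :
    (PySem.Str.slice t (some a) (some b)).toList
      = List.take (b.toNat - a.toNat) (List.drop a.toNat t.toList) := by
  rw [show (PySem.Str.slice t (some a) (some b)).toList
      = PySem.List.slice t.toList (some a) (some b) from by simp]
  exact PySem.List.slice_toNat _ ha hb

-- the scan over one keyword length L finds exactly the length-L keywords occurring in t
theorem bScanAt_iff (t : String) (long : PySem.Set String) (L : Int)
    (h0 : 0 ≤ L) (hL : L ≤ (t.toList.length : Int)) :
    bScanAt t long L = true ↔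
      ∃ kw ∈ long, (kw.toList.length : Int) = L ∧ kw.toList <:+: t.toList := by
  unfold bScanAt
  rw [List.any_eq_true]
  constructor
  · rintro ⟨i, hi, hc⟩
    rw [PySem.List.mem_pyRange_one] at hi
    obtain ⟨hi0, hilt⟩ := hi
    rw [PySem.Str.len_eq] at hilt
    rw [PySem.Set.contains_iff] at hc
    have hslice : (PySem.Str.slice t (some i) (some (i + L))).toList
        = List.take ((i + L).toNat - i.toNat) (List.drop i.toNat t.toList) :=
      pv_slice_toList t i (i + L) hi0 (by omega)
    refine ⟨_, hc, ?_, ?_⟩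
    · rw [hslice]
      simp only [List.length_take, List.length_drop]
      omega
    · rw [hslice]
      exact ((List.take_prefix _ _).isInfix.trans (List.drop_suffix _ _).isInfix)
  · rintro ⟨kw, hmem, hlen, hinf⟩
    rw [List.infix_iff_prefix_suffix] at hinf
    obtain ⟨u, hpre, hsuf⟩ := hinf
    have hj := List.suffix_iff_eq_drop.mp hsuf
    have hul : u.length ≤ t.toList.length := List.IsSuffix.length_le hsuf
    have hku : kw.toList.length ≤ u.length := List.IsPrefix.length_le hpre
    have hkw : kw.toList = List.take kw.toList.length (List.drop (t.toList.length - u.length) t.toList) := by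
      conv_lhs => rw [List.prefix_iff_eq_take.mp hpre]
      exact congrArg _ hj
    refine ⟨((t.toList.length - u.length : Nat) : Int), ?_, ?_⟩
    · rw [PySem.List.mem_pyRange_one, PySem.Str.len_eq]
      constructor <;> omega
    · rw [PySem.Set.contains_iff]
      have heq : PySem.Str.slice t (some ((t.toList.length - u.length : Nat) : Int))
          (some (((t.toList.length - u.length : Nat) : Int) + L)) = kw := by
        rw [← String.toList_inj,
          pv_slice_toList t _ _ (by positivity) (by omega), Int.toNat_natCast]
        have h1 : ((((t.toList.length - u.length : Nat) : Int) + L).toNat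
            - (t.toList.length - u.length)) = kw.toList.length := by omega
        rw [h1]
        exact hkw.symm
      rw [heq]
      exact hmem

-- the 'any' over the feasible lengths finds exactly the long keywords occurring in t
theorem b_any_iff (t : String) (long : PySem.Set String) (lens : List Int)
    (hnn : ∀ L ∈ lens, 0 ≤ L) :
    ((lens.filter (fun L => decide (L ≤ PySem.Str.len t))).any (bScanAt t long)) = true ↔
      ∃ kw ∈ long, kw.toList <:+: t.toList ∧ (kw.toList.length : Int) ∈ lens := by
  rw [List.any_eq_true]
  constructor
  · rintro ⟨L, hL, hs⟩
    rw [List.mem_filter, decide_eq_true_eq, PySem.Str.len_eq] at hL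
    obtain ⟨kw, hkw, hlen, hinf⟩ := (bScanAt_iff t long L (hnn L hL.1) hL.2).mp hs
    exact ⟨kw, hkw, hinf, hlen ▸ hL.1⟩
  · rintro ⟨kw, hkw, hinf, hmem⟩
    have hle : kw.toList.length ≤ t.toList.length := List.IsInfix.length_le hinf
    refine ⟨(kw.toList.length : Int), ?_, ?_⟩
    · rw [List.mem_filter, decide_eq_true_eq, PySem.Str.len_eq]
      exact ⟨hmem, by exact_mod_cast hle⟩
    · exact (bScanAt_iff t long _ (by positivity) (by exact_mod_cast hle)).mpr
        ⟨kw, hkw, rfl, hinf⟩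

-- per-token: A's hit test and B's hit test agree (the keyword sets have equal membership)
theorem pv_hit_eq (hr kws : PySem.Set String) (hmem : ∀ x, x ∈ hr ↔ x ∈ kws) (t : String) :
    (PySem.Set.contains hr t || pvInnerA t hr)
      = bHit kws (bLong kws) (bLens (bLong kws)) t := by
  have hmemlong : ∀ x, x ∈ bLong kws ↔ x ∈ kws ∧ 4 ≤ (x.toList.length : Int) := by
    intro x
    simp [bLong, PySem.Set.mem_ofList, List.mem_filter, PySem.Str.len_eq]
  have hlens : ∀ kw ∈ bLong kws, (kw.toList.length : Int) ∈ bLens (bLong kws) := by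
    intro kw h
    simp only [bLens, PySem.Set.mem_ofList, List.mem_map]
    exact ⟨kw, h, PySem.Str.len_eq kw⟩
  have hnn : ∀ L ∈ bLens (bLong kws), 0 ≤ L := by
    intro L hL
    simp only [bLens, PySem.Set.mem_ofList, List.mem_map] at hL
    obtain ⟨kw, _, rfl⟩ := hL
    simp [PySem.Str.len_eq]
  rw [Bool.eq_iff_iff]
  unfold bHit
  simp only [Bool.or_eq_true]
  rw [b_any_iff t (bLong kws) (bLens (bLong kws)) hnn]
  simp only [PySem.Set.contains_iff, pvInnerA_eq_any, List.any_eq_true,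
    Bool.and_eq_true, decide_eq_true_eq, PySem.Str.isIn_iff_infix, PySem.Str.len_eq]
  constructor
  · rintro (h | ⟨kw, hkw, h4, hinf⟩)
    · exact Or.inl ((hmem t).mp h)
    · have hl : kw ∈ bLong kws := (hmemlong kw).mpr ⟨(hmem kw).mp hkw, h4⟩
      exact Or.inr ⟨kw, hl, hinf, hlens _ hl⟩
  · rintro (h | ⟨kw, hkw, hinf, _⟩)
    · exact Or.inl ((hmem t).mpr h)
    · obtain ⟨hk, h4⟩ := (hmemlong kw).mp hkw
      exact Or.inr ⟨kw, (hmem kw).mpr hk, h4, hinf⟩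

-- A's counting loop and B's 0/1-sum count the same tokens
theorem pv_count_eq (tokens : List String) (hr kws : PySem.Set String)
    (hmem : ∀ x, x ∈ hr ↔ x ∈ kws) :
    tokens.foldl (fun hits t =>
        if PySem.Set.contains hr t then hits + 1
        else if pvInnerA t hr then hits + 1 else hits) (0 : Int)
      = (tokens.map (fun t =>
          if bHit kws (bLong kws) (bLens (bLong kws)) t then (1 : Int) else 0)).sum := by
  have hA := PySem.List.foldl_congr_mem tokens
    (fun hits t => if PySem.Set.contains hr t then hits + 1
      else if pvInnerA t hr then hits + 1 else hits)
    (fun hits t => if (PySem.Set.contains hr t || pvInnerA t hr) = true then hits + 1 else hits)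
    (0 : Int)
    (by intro acc x _
        cases h1 : PySem.Set.contains hr x <;> cases h2 : pvInnerA x hr <;> simp_all)
  rw [hA, PySem.List.foldl_if_add_one, PySem.List.sum_map_ite_one_zero, zero_add]
  congr 1
  exact List.countP_congr (fun x _ => by rw [pv_hit_eq hr kws hmem x])

-- the combined keyword set is never empty (it contains "connexion")
theorem pv_hrA_ne_nil (high_risk_words : Option (List String)) :
    ¬ (pvHrA high_risk_words = ([] : List String)) := by
  intro h
  have : "connexion" ∈ pvHrA high_risk_words :=
    (PySem.Set.mem_update _ _ _).mpr (Or.inr (by simp [pvRiskWords]))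
  rw [h] at this
  simp at this

-- ===== VERDICT (by name: the statement is the Claim_ definition above) =====
theorem count_high_risk_hits_py_spec : Claim_equal_count_high_risk_hits_py := by
  intro tokens high_risk_words _
  unfold Spec_count_high_risk_hits_py count_high_risk_hits_py count_high_risk_hits_py_alt
  rw [if_neg (pv_hrA_ne_nil high_risk_words)]
  exact pv_count_eq tokens _ _ (pv_mem_hr_kws high_risk_words)
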